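-- pv_equiv track=rewrite | github.com/tealeaf2/ND_CompSecurity_Project | algorithms/rsa/rsa.py | find_coprimes
-- ===== SOURCE A (Python) =====
-- def gcd(a, b):
--   while b != 0:
--     a, b = b, a % b
--   return a
--
-- def find_coprimes(number):
--   coprimes = []
--   for i in range(1, number + 1):
--     if gcd(i, number) == 1:
--       coprimes.append(i)
--     if len(coprimes)>=10:
--       break
--   return coprimes
-- ===== SOURCE B (Python) =====
-- def find_coprimes(number):
--   # Factor `number` into its distinct prime factors once, then test candidates
--   # by divisibility against that small set instead of running gcd per candidate.
--   primes = []
--   m = number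
--   d = 2
--   while d * d <= m:
--     if m % d == 0:
--       primes.append(d)
--       while m % d == 0:
--         m //= d
--     d += 1
--   if m > 1:
--     primes.append(m)
--   coprimes = []
--   i = 1
--   while i <= number:
--     if all(i % p != 0 for p in primes):
--       coprimes.append(i)
--       if len(coprimes) >= 10:
--         break
--     i += 1
--   return coprimes
-- ===== Notes on version B (the rewrite author's own statement) =====
-- stated objective: alternative
-- what changed: Replaced the per-candidate Euclidean gcd test with a one-time trial-division factorization of number into its distinct prime factors followed by a simple divisibility test per candidate.
import Mathlib
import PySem

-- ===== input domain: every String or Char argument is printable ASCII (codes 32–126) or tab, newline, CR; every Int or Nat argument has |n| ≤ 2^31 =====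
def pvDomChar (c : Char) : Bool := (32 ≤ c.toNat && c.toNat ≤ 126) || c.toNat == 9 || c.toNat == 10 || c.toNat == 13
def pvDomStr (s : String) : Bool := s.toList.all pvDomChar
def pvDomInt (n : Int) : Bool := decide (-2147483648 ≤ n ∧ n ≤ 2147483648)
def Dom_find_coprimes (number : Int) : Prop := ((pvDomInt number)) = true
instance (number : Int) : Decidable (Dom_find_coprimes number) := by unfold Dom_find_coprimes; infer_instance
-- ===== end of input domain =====

-- B replaces A's per-candidate Euclidean gcd test by a one-time trial-division
-- factorization of `number` followed by a divisibility test per candidate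
-- (objective: alternative algorithm of similar cost).

-- ===== PORT A =====
-- termination measures for the loops (cited by name in decreasing_by)
lemma pyGcd_dec (a b : Int) (h : ¬ b = 0) : (PySem.Int.mod a b).natAbs < b.natAbs := by
  rcases lt_trichotomy b 0 with hb | hb | hb
  · have h1 := PySem.Int.mod_neg_bounds (a := a) hb
    omega
  · exact absurd hb h
  · have h1 := PySem.Int.mod_nonneg (a := a) hb
    have h2 := PySem.Int.mod_lt (a := a) hb
    omega

lemma scan_dec (n i : Int) (h : i ≤ n) : (n + 1 - (i + 1)).toNat < (n + 1 - i).toNat := by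
  omega

-- Python `gcd(a, b)`: while b != 0: a, b = b, a % b
def pyGcd (a b : Int) : Int :=
  if h : b = 0 then a else pyGcd b (PySem.Int.mod a b)
termination_by b.natAbs
decreasing_by exact pyGcd_dec a b h

-- `for i in range(1, number + 1): … break` as recursion on i
def loopA (n i : Int) (acc : List Int) : List Int :=
  if h : i ≤ n then
    let acc' := if pyGcd i n = 1 then acc ++ [i] else acc
    if 10 ≤ acc'.length then acc' else loopA n (i + 1) acc'
  else acc
termination_by (n + 1 - i).toNat
decreasing_by exact scan_dec n i h

def find_coprimes (number : Int) : List Int := loopA number 1 []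

-- ===== PORT B =====
-- termination measures for B's loops (cited by name in decreasing_by)
lemma stripB_dec (d m : Int) (h : PySem.Int.mod m d = 0 ∧ 2 ≤ d ∧ 1 ≤ m) :
    (PySem.Int.floordiv m d).toNat < m.toNat := by
  obtain ⟨h1, h2, h3⟩ := h
  have hm : m = ((m.toNat : Nat) : Int) := by omega
  have hd : d = ((d.toNat : Nat) : Int) := by omega
  rw [hm, hd, PySem.Int.floordiv_natCast]
  have := Nat.div_lt_self (show 0 < m.toNat by omega) (show 1 < d.toNat by omega)
  omega

-- inner `while m % d == 0: m //= d`; the `2 ≤ d ∧ 1 ≤ m` conjuncts only guard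
-- termination (they hold at every reachable call; Python would diverge otherwise)
def stripB (d m : Int) : Int :=
  if h : PySem.Int.mod m d = 0 ∧ 2 ≤ d ∧ 1 ≤ m then stripB d (PySem.Int.floordiv m d) else m
termination_by m.toNat
decreasing_by exact stripB_dec d m h

lemma stripB_le (d m : Int) : stripB d m ≤ m := by
  induction m using stripB.induct d with
  | case1 m h ih =>
      rw [stripB, dif_pos h]
      refine le_trans ih ?_
      have := stripB_dec d m h
      omega
  | case2 m h => rw [stripB, dif_neg h]

lemma le_of_sq_le (d m : Int) (h : d * d ≤ m) : d ≤ m := by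
  rcases Int.lt_or_le 1 d with hd | hd
  · calc d = d * 1 := (mul_one d).symm
      _ ≤ d * d := by apply mul_le_mul_of_nonneg_left <;> omega
      _ ≤ m := h
  · by_cases hd1 : d = 1
    · subst hd1; simpa using h
    · have h0 : 0 ≤ d * d := mul_self_nonneg d
      omega

lemma factorLoop_dec1 (m d : Int) (h : d * d ≤ m) :
    ((stripB d m) + 1 - (d + 1)).toNat < (m + 1 - d).toNat := by
  have h1 := stripB_le d m
  have h2 : d ≤ m := le_of_sq_le d m h
  omega

lemma factorLoop_dec2 (m d : Int) (h : d * d ≤ m) :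
    (m + 1 - (d + 1)).toNat < (m + 1 - d).toNat := by
  have h2 : d ≤ m := le_of_sq_le d m h
  omega

-- outer `while d * d <= m:` loop; returns the final (m, primes)
def factorLoop (m d : Int) (primes : List Int) : Int × List Int :=
  if h : d * d ≤ m then
    if PySem.Int.mod m d = 0 then factorLoop (stripB d m) (d + 1) (primes ++ [d])
    else factorLoop m (d + 1) primes
  else (m, primes)
termination_by (m + 1 - d).toNat
decreasing_by
  · exact factorLoop_dec1 m d h
  · exact factorLoop_dec2 m d h

def factorsB (number : Int) : List Int :=
  let r := factorLoop number 2 []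
  if 1 < r.1 then r.2 ++ [r.1] else r.2

-- `while i <= number:` candidate scan testing divisibility by the prime set
def loopB (n : Int) (primes : List Int) (i : Int) (acc : List Int) : List Int :=
  if h : i ≤ n then
    if primes.all (fun p => PySem.Int.mod i p != 0) then
      let acc' := acc ++ [i]
      if 10 ≤ acc'.length then acc' else loopB n primes (i + 1) acc'
    else loopB n primes (i + 1) acc
  else acc
termination_by (n + 1 - i).toNat
decreasing_by all_goals exact scan_dec n i h

def find_coprimes_alt (number : Int) : List Int :=
  loopB number (factorsB number) 1 []

-- ===== PRECONDITION & SPEC =====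
def Spec_find_coprimes (number : Int) (out : List Int) : Prop := out = find_coprimes_alt number
instance (number : Int) (out : List Int) : Decidable (Spec_find_coprimes number out) := by unfold Spec_find_coprimes; infer_instance

-- ===== CLAIM (what is proved, stated in full; the proofs are below) =====
def Claim_equal_find_coprimes : Prop := ∀ (number : Int), Dom_find_coprimes number → Spec_find_coprimes number (find_coprimes number)

-- ===== LEMMAS AND PROOFS =====

lemma pyGcd_eq_gcd (a b : Int) : 0 ≤ a → 0 ≤ b → pyGcd a b = (Int.gcd a b : Int) := by
  induction a, b using pyGcd.induct with
  | case1 a =>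
      intro ha _
      rw [pyGcd, dif_pos rfl]
      simp [Int.natAbs_of_nonneg ha]
  | case2 a b hb ih =>
      intro ha hb0
      have hbpos : 0 < b := lt_of_le_of_ne hb0 (Ne.symm hb)
      rw [pyGcd, dif_neg hb, PySem.Int.mod_eq_emod_of_pos hbpos]
      rw [PySem.Int.mod_eq_emod_of_pos hbpos] at ih
      rw [ih hb0 (Int.emod_nonneg a (by omega)), Int.gcd_comm b, Int.gcd_emod]

-- after stripB's guard fires: floordiv is ediv, m = d * (m / d), and m / d ≥ 1
lemma guard_facts (d m : Int) (h1 : PySem.Int.mod m d = 0) (h2 : 2 ≤ d) (h3 : 1 ≤ m) :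
    PySem.Int.floordiv m d = m / d ∧ d * (m / d) = m ∧ 1 ≤ m / d := by
  have hdvd : d ∣ m := (PySem.Int.mod_eq_zero_iff_dvd m d).mp h1
  have he : d * (m / d) = m := Int.mul_ediv_cancel' hdvd
  refine ⟨PySem.Int.floordiv_eq_ediv_of_pos (by omega), he, ?_⟩
  nlinarith [Int.ediv_nonneg (le_trans (by omega) h3) (a := m) (by omega : (0:Int) ≤ d)]

lemma stripB_pos (d m : Int) (hd : 2 ≤ d) : 1 ≤ m → 1 ≤ stripB d m := by
  induction m using stripB.induct d with
  | case1 m h ih =>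
      intro hm
      obtain ⟨hf, he, hq⟩ := guard_facts d m h.1 h.2.1 h.2.2
      rw [stripB, dif_pos h]
      exact ih (by rw [hf]; exact hq)
  | case2 m h => intro hm; rw [stripB, dif_neg h]; exact hm

lemma stripB_dvd (d m : Int) : stripB d m ∣ m := by
  induction m using stripB.induct d with
  | case1 m h ih =>
      obtain ⟨hf, he, hq⟩ := guard_facts d m h.1 h.2.1 h.2.2
      rw [stripB, dif_pos h]
      exact dvd_trans ih (by rw [hf]; exact Dvd.intro d (by rw [mul_comm] at he; exact he))
  | case2 m h => rw [stripB, dif_neg h]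

lemma stripB_not_dvd (d m : Int) (hd : 2 ≤ d) : 1 ≤ m → ¬ d ∣ stripB d m := by
  induction m using stripB.induct d with
  | case1 m h ih =>
      intro hm
      obtain ⟨hf, he, hq⟩ := guard_facts d m h.1 h.2.1 h.2.2
      rw [stripB, dif_pos h]
      exact ih (by rw [hf]; exact hq)
  | case2 m h =>
      intro hm
      rw [stripB, dif_neg h]
      intro hdvd
      exact h ⟨(PySem.Int.mod_eq_zero_iff_dvd m d).mpr hdvd, hd, hm⟩

lemma stripB_prime_dvd (d m q : Int) (hdp : Prime d) (hq : Prime q) (hq0 : 0 < q)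
    (hd0 : 0 < d) (hqd : q ≠ d) : q ∣ m → q ∣ stripB d m := by
  induction m using stripB.induct d with
  | case1 m h ih =>
      intro hdvd
      obtain ⟨hf, he, hquot⟩ := guard_facts d m h.1 h.2.1 h.2.2
      rw [stripB, dif_pos h]
      apply ih
      rw [hf]
      have hdvd2 : q ∣ d * (m / d) := by rw [he]; exact hdvd
      rcases hq.dvd_mul.mp hdvd2 with hcase | hcase
      · exfalso
        rcases Int.associated_iff.mp (hq.associated_of_dvd hdp hcase) with h' | h'
        · exact hqd h'
        · omega
      · exact hcase
  | case2 m h => intro hdvd; rw [stripB, dif_neg h]; exact hdvd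

lemma prime_two_le (q : Int) (hq : Prime q) (hq0 : 0 < q) : 2 ≤ q := by
  have := (Int.prime_iff_natAbs_prime.mp hq).two_le
  omega

-- d is prime when d divides m, m's prime factors are all ≥ d, and 2 ≤ d
lemma dvd_min_prime (d m : Int) (hd : 2 ≤ d) (hdm : d ∣ m) (hm : 1 ≤ m)
    (hmin : ∀ q : Int, Prime q → 0 < q → q ∣ m → d ≤ q) : Prime d := by
  have hna : (d.natAbs : Int) = d := Int.natAbs_of_nonneg (by omega)
  have hq : (d.natAbs.minFac).Prime := Nat.minFac_prime (by omega)
  have hq1 : (d.natAbs.minFac : Int) ∣ d := by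
    rw [← hna]; exact_mod_cast Nat.minFac_dvd _
  have hle := hmin _ (Nat.prime_iff_prime_int.mp hq) (by exact_mod_cast hq.pos)
    (dvd_trans hq1 hdm)
  have hge : d.natAbs.minFac ≤ d.natAbs := Nat.minFac_le (by omega)
  have heq : d.natAbs.minFac = d.natAbs := by omega
  rw [Int.prime_iff_natAbs_prime, ← heq]
  exact hq

lemma factorLoop_spec (n : Int) : ∀ m d ps, 1 ≤ m → 2 ≤ d → m ∣ n →
    (∀ p ∈ ps, p ∣ n ∧ 2 ≤ p) →
    (∀ q : Int, Prime q → 0 < q → q ∣ n → q ∈ ps ∨ q ∣ m) →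
    (∀ q : Int, Prime q → 0 < q → q ∣ m → d ≤ q) →
    (∀ p ∈ (factorLoop m d ps).2, p ∣ n ∧ 2 ≤ p) ∧
    1 ≤ (factorLoop m d ps).1 ∧ (factorLoop m d ps).1 ∣ n ∧
    (∀ q : Int, Prime q → 0 < q → q ∣ n →
       q ∈ (factorLoop m d ps).2 ∨ (1 < (factorLoop m d ps).1 ∧ q = (factorLoop m d ps).1)) := by
  intro m d ps
  induction m, d, ps using factorLoop.induct with
  | case1 m d ps h hmod ih =>
      intro hm hd hmn hps hcov hmin
      have hdm : d ∣ m := (PySem.Int.mod_eq_zero_iff_dvd m d).mp hmod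
      have hprime : Prime d := dvd_min_prime d m hd hdm hm hmin
      have hm' : 1 ≤ stripB d m := stripB_pos d m hd hm
      have hdvd' : stripB d m ∣ m := stripB_dvd d m
      have hnd : ¬ d ∣ stripB d m := stripB_not_dvd d m hd hm
      rw [factorLoop, dif_pos h, if_pos hmod]
      apply ih hm' (by omega) (dvd_trans hdvd' hmn)
      · intro p hp
        rcases List.mem_append.mp hp with h' | h'
        · exact hps p h'
        · have : p = d := by simpa using h'
          subst this
          exact ⟨dvd_trans hdm hmn, hd⟩
      · intro q hq hq0 hqn
        rcases hcov q hq hq0 hqn with h' | h'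
        · exact Or.inl (List.mem_append_left _ h')
        · by_cases hqd : q = d
          · exact Or.inl (List.mem_append_right _ (by simp [hqd]))
          · exact Or.inr (stripB_prime_dvd d m q hprime hq hq0 (by omega) hqd h')
      · intro q hq hq0 hqm'
        have hge := hmin q hq hq0 (dvd_trans hqm' hdvd')
        have hne : q ≠ d := by rintro rfl; exact hnd hqm'
        omega
  | case2 m d ps h hmod ih =>
      intro hm hd hmn hps hcov hmin
      have hnd : ¬ d ∣ m := fun hh => hmod ((PySem.Int.mod_eq_zero_iff_dvd m d).mpr hh)
      rw [factorLoop, dif_pos h, if_neg hmod]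
      apply ih hm (by omega) hmn hps hcov
      intro q hq hq0 hqm
      have hge := hmin q hq hq0 hqm
      have hne : q ≠ d := by rintro rfl; exact hnd hqm
      omega
  | case3 m d ps h =>
      intro hm hd hmn hps hcov hmin
      rw [factorLoop, dif_neg h]
      refine ⟨hps, hm, hmn, ?_⟩
      intro q hq hq0 hqn
      rcases hcov q hq hq0 hqn with h' | h'
      · exact Or.inl h'
      · right
        have hq2 : 2 ≤ q := prime_two_le q hq hq0
        have hqd : d ≤ q := hmin q hq hq0 h'
        have hqm : q ≤ m := Int.le_of_dvd (by omega) h'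
        have hm1 : 1 < m := by omega
        refine ⟨hm1, ?_⟩
        by_contra hne
        have hqlt : q < m := lt_of_le_of_ne hqm hne
        set t := m / q with ht
        have hmt : q * t = m := Int.mul_ediv_cancel' h'
        have ht1 : 1 ≤ t := by nlinarith
        have ht2 : 2 ≤ t := by
          rcases eq_or_lt_of_le ht1 with h'' | h''
          · exfalso; rw [← h'', mul_one] at hmt; omega
          · omega
        have hrp : (t.natAbs.minFac).Prime := Nat.minFac_prime (by omega)
        have hrt : (t.natAbs.minFac : Int) ∣ t := by
          have := Nat.minFac_dvd t.natAbs
          have hna : (t.natAbs : Int) = t := Int.natAbs_of_nonneg (by omega)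
          rw [← hna]; exact_mod_cast this
        have hrm : (t.natAbs.minFac : Int) ∣ m := dvd_trans hrt ⟨q, by rw [mul_comm t q]; omega⟩
        have hrd : d ≤ (t.natAbs.minFac : Int) :=
          hmin _ (Nat.prime_iff_prime_int.mp hrp) (by exact_mod_cast hrp.pos) hrm
        have hrlet : (t.natAbs.minFac : Int) ≤ t :=
          Int.le_of_dvd (by omega) hrt
        nlinarith

lemma factorsB_spec (n : Int) (hn : 1 ≤ n) :
    (∀ p ∈ factorsB n, p ∣ n ∧ 2 ≤ p) ∧
    (∀ q : Int, Prime q → 0 < q → q ∣ n → q ∈ factorsB n) := by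
  have hspec := factorLoop_spec n n 2 [] hn (le_refl 2) dvd_rfl
    (by simp)
    (fun q _ _ hqn => Or.inr hqn)
    (fun q hq hq0 _ => prime_two_le q hq hq0)
  obtain ⟨h1, h2, h3, h4⟩ := hspec
  simp only [factorsB]
  split_ifs with hcase
  · constructor
    · intro p hp
      rcases List.mem_append.mp hp with h' | h'
      · exact h1 p h'
      · have : p = (factorLoop n 2 []).1 := by simpa using h'
        subst this
        exact ⟨h3, by omega⟩
    · intro q hq hq0 hqn
      rcases h4 q hq hq0 hqn with h' | ⟨_, h'⟩
      · exact List.mem_append_left _ h'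
      · exact List.mem_append_right _ (by simp [h'])
  · constructor
    · exact h1
    · intro q hq hq0 hqn
      rcases h4 q hq hq0 hqn with h' | ⟨h'', _⟩
      · exact h'
      · exact absurd h'' hcase

lemma test_iff (n i : Int) (hn : 1 ≤ n) (hi : 0 ≤ i) :
    (pyGcd i n = 1) ↔ ((factorsB n).all (fun p => PySem.Int.mod i p != 0) = true) := by
  obtain ⟨hfac, hcov⟩ := factorsB_spec n hn
  rw [pyGcd_eq_gcd i n hi (by omega)]
  simp only [List.all_eq_true, bne_iff_ne, ne_eq, PySem.Int.mod_eq_zero_iff_dvd]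
  constructor
  · intro hg p hp hpi
    obtain ⟨hpn, hp2⟩ := hfac p hp
    have : p ∣ (Int.gcd i n : Int) := Int.dvd_coe_gcd hpi hpn
    rw [hg] at this
    have := Int.le_of_dvd (by omega) this
    omega
  · intro hall
    by_contra hg
    have hg0 : Int.gcd i n ≠ 0 := by
      intro h0
      have := Int.gcd_eq_zero_iff.mp h0
      omega
    have hg1 : Int.gcd i n ≠ 1 := by
      intro h1
      exact hg (by rw [h1]; norm_num)
    have hg2 : 2 ≤ Int.gcd i n := by omega
    set g := Int.gcd i n with hgdef
    have hqp : g.minFac.Prime := Nat.minFac_prime (by omega)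
    have hqg : (g.minFac : Int) ∣ (g : Int) := by exact_mod_cast Nat.minFac_dvd g
    have hqi : (g.minFac : Int) ∣ i := dvd_trans hqg (Int.gcd_dvd_left i n)
    have hqn : (g.minFac : Int) ∣ n := dvd_trans hqg (Int.gcd_dvd_right i n)
    have hmem := hcov _ (Nat.prime_iff_prime_int.mp hqp) (by exact_mod_cast hqp.pos) hqn
    exact hall _ hmem hqi

lemma loops_eq (n : Int) (hn : 1 ≤ n) (k : Nat) :
    ∀ i acc, (n + 1 - i).toNat ≤ k → 1 ≤ i → acc.length < 10 →
      loopA n i acc = loopB n (factorsB n) i acc := by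
  induction k with
  | zero =>
      intro i acc hk hi hlen
      rw [loopA, dif_neg (by omega), loopB, dif_neg (by omega)]
  | succ k ih =>
      intro i acc hk hi hlen
      by_cases hle : i ≤ n
      · rw [loopA, dif_pos hle, loopB, dif_pos hle]
        by_cases htest : pyGcd i n = 1
        · have hb : ((factorsB n).all (fun p => PySem.Int.mod i p != 0) = true) :=
            (test_iff n i hn (by omega)).mp htest
          simp only [if_pos htest, if_pos hb]
          by_cases hl : 10 ≤ (acc ++ [i]).length
          · simp only [if_pos hl]
          · simp only [if_neg hl]
            exact ih (i + 1) (acc ++ [i]) (by omega) (by omega)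
              (by simp at hl ⊢; omega)
        · have hb : ¬ ((factorsB n).all (fun p => PySem.Int.mod i p != 0) = true) :=
            fun hh => htest ((test_iff n i hn (by omega)).mpr hh)
          simp only [if_neg htest, if_neg hb, if_neg (show ¬ 10 ≤ acc.length by omega)]
          exact ih (i + 1) acc (by omega) (by omega) hlen
      · rw [loopA, dif_neg hle, loopB, dif_neg hle]

-- ===== VERDICT (by name: the statement is the Claim_ definition above) =====
theorem find_coprimes_spec : Claim_equal_find_coprimes := by
  intro number _
  unfold Spec_find_coprimes find_coprimes find_coprimes_alt
  by_cases hn : 1 ≤ number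
  · exact loops_eq number hn (number + 1).toNat 1 [] (by omega) (by omega) (by simp)
  · rw [loopA, dif_neg (by omega), loopB, dif_neg (by omega)]
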